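-- pv_equiv track=rewrite | github.com/jacksonhenry3/Qnibble | Python/Tools/randomHamiltonian.py | _generating_sequences
-- ===== SOURCE A (Python) =====
-- from itertools import permutations, groupby
-- from collections import Counter
--
-- def _generating_sequences(nqubit: int, energy: int) -> list:
--     """creates multi sets of abcd sequences to be used as generators.
--     Works by recursivly generating abcd sequences for lower energy subspaces and adding one element that will increase the energy by one.
--
--      **a**: **0**->**0**
--      **b**: **1**->**0**
--      **c**: **0**->**1**
--      **d**: **1**->**1**
--
--      a sequence of all "a"s is in energy subspace zero.
--      By replacing one "a" with a "d" we increase the energy subspace by one.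
--      By replacing two "a"s with a "b" and a "c" it increases the energy subspace by one.
--
--     """
--
--     # cant have more energy than qubits
--     assert energy <= nqubit, f"there are {nqubit} qubits with {energy} energy, can't have more energy than qubits"
--
--     # this is the recursive base case
--     if energy == 0:
--         return [Counter(a=nqubit)]
--
--     result = []
--     # loop through each generating sequence of one energy level lower
--     for sequence in _generating_sequences(nqubit, energy - 1):
--         s1, s2 = sequence.copy(), sequence.copy()
--
--         # if there is at least one "a" in the sequence
--         if s1['a'] > 0:
--             # remove one a, add one d
--             s1['a'], s1['d'] = s1['a'] - 1, s1['d'] + 1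
--
--             # add generator to result
--             result += [s1]
--         # if there is at least two "a"s in the sequence
--         if s2['a'] > 1:
--             # reduce the number of "a"s by two and add a "b" and a "c"
--             s2['a'], s2['b'], s2['c'] = s2['a'] - 2, s2['b'] + 1, s2['c'] + 1
--
--             # add generator to result
--             result += [s2]
--
--     # the +is a special counter thing that drops zeros.
--     return list(+result for result, _ in groupby(result))
-- ===== SOURCE B (Python) =====
-- from collections import Counter
--
--
-- def _generating_sequences(nqubit: int, energy: int) -> list:
--     """Directly emit the multiset Counter(a=nqubit-energy-m, d=energy-m, b=m, c=m)
--     for m = 0..min(energy, nqubit-energy), dropping zero counts."""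
--     assert energy <= nqubit, f"there are {nqubit} qubits with {energy} energy, can't have more energy than qubits"
--     result = []
--     for m in range(min(energy, nqubit - energy) + 1):
--         c = Counter()
--         if nqubit - energy - m > 0:
--             c['a'] = nqubit - energy - m
--         if energy - m > 0:
--             c['d'] = energy - m
--         if m > 0:
--             c['b'] = m
--             c['c'] = m
--         result.append(c)
--     return result
-- ===== Notes on version B (the rewrite author's own statement) =====
-- stated objective: faster
-- what changed: A recursively builds each energy level from the previous one (copying Counters, deduplicating adjacent duplicates with groupby, stripping zeros); B emits the closed-form multiset Counter(a=n-e-m, d=e-m, b=m, c=m) for m in 0..min(energy, nqubit-energy) in a single loop.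
-- intended difference: On nqubit=0, energy=0 A returns its unstripped base case [Counter({'a': 0})] with an explicit zero entry, while B returns [Counter()]; dropping zero counts is A's own documented intent (its '+' comprehension does so on every other path), so the empty multiset is the intended value. — e.g. on _generating_sequences(0, 0): A returns [[("a", 0)]], B returns [[]]
import Mathlib
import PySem

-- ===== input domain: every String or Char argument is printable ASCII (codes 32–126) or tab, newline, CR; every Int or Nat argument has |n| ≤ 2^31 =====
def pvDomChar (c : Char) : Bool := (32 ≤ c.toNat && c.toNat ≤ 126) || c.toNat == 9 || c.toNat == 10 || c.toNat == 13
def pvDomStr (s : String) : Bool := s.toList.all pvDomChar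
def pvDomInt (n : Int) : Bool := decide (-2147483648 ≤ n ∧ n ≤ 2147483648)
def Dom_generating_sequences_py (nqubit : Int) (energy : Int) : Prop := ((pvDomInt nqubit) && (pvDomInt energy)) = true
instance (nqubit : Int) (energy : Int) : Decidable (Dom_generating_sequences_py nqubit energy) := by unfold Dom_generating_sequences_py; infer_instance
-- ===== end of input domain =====

-- B replaces A's level-by-level recursive construction (Counter copies + groupby dedup + zero
-- stripping at every energy level) by directly emitting the closed-form multiset
-- {a: n-e-m, d: e-m, b: m, c: m} for m = 0..min(energy, nqubit-energy); measurably faster.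

-- ===== PORT A =====
-- Counter/dict helpers shared by both ports (exact ports of Python dict semantics):
-- Counter lookup: missing key counts 0.
def cval (d : List (String × Int)) (k : String) : Int :=
  match d with
  | [] => 0
  | (k', v) :: t => if k' = k then v else cval t k

-- dict assignment: overwrite in place, else append.
def cset (d : List (String × Int)) (k : String) (v : Int) : List (String × Int) :=
  match d with
  | [] => [(k, v)]
  | (k', v') :: t => if k' = k then (k', v) :: t else (k', v') :: cset t k v

-- Counter equality (Python 3.10+ Counter.__eq__): equal counts on every key of either side,
-- missing keys counting as 0.
def ceq (d1 d2 : List (String × Int)) : Bool :=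
  (d1 ++ d2).all (fun kv => cval d1 kv.1 == cval d2 kv.1)

-- unary +Counter: keep strictly positive counts, in order.
def cplus (d : List (String × Int)) : List (String × Int) :=
  d.filter (fun kv => decide (0 < kv.2))

-- keys of itertools.groupby with identity key: first element of each maximal run of equals.
def cdedup : List (List (String × Int)) → List (List (String × Int))
  | [] => []
  | x :: xs => x :: cdedup (xs.dropWhile (fun y => ceq x y))
termination_by l => l.length
decreasing_by
  simp only [List.length_cons]
  exact Nat.lt_succ_of_le (List.length_dropWhile_le _ _)

-- one iteration of A's `for sequence in _generating_sequences(...)` loop body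
def pyA_step (acc : List (List (String × Int))) (s : List (String × Int)) :
    List (List (String × Int)) :=
  let acc1 := if cval s "a" > 0 then
      acc ++ [cset (cset s "a" (cval s "a" - 1)) "d" (cval s "d" + 1)]
    else acc
  if cval s "a" > 1 then
    acc1 ++ [cset (cset (cset s "a" (cval s "a" - 2)) "b" (cval s "b" + 1)) "c" (cval s "c" + 1)]
  else acc1

-- A's recursion on the energy level (Nat-valued fuel = energy, exact for energy ≥ 0)
def goA (n : Int) : Nat → List (List (String × Int))
  | 0 => [[("a", n)]]
  | k + 1 => (cdedup ((goA n k).foldl pyA_step [])).map cplus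

-- assert failure (energy > nqubit) and infinite recursion (energy < 0) raise in Python: outside Pre_.
def generating_sequences_py (nqubit : Int) (energy : Int) : List (List (String × Int)) :=
  if energy ≤ nqubit then (if 0 ≤ energy then goA nqubit energy.toNat else []) else []

-- ===== PORT B =====
def mkCounter (n e m : Int) : List (String × Int) :=
  let c : List (String × Int) := []
  let c := if n - e - m > 0 then cset c "a" (n - e - m) else c
  let c := if e - m > 0 then cset c "d" (e - m) else c
  if m > 0 then cset (cset c "b" m) "c" m else c

def generating_sequences_py_alt (nqubit : Int) (energy : Int) : List (List (String × Int)) :=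
  if energy ≤ nqubit then
    (List.range (min energy (nqubit - energy) + 1).toNat).map
      (fun m : Nat => mkCounter nqubit energy (m : Int))
  else []

-- ===== PRECONDITION & SPEC =====
-- Pre_ excludes exactly the inputs where A raises: energy > nqubit (AssertionError) and
-- energy < 0 (unbounded recursion, RecursionError).
def Pre_generating_sequences_py (nqubit : Int) (energy : Int) : Prop :=
  0 ≤ energy ∧ energy ≤ nqubit
instance (nqubit : Int) (energy : Int) : Decidable (Pre_generating_sequences_py nqubit energy) := by
  unfold Pre_generating_sequences_py; infer_instance

def pvWitness_generating_sequences_py : Int × Int := (2, 1)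

-- On nqubit=0, energy=0 A returns its unstripped base case [Counter({'a': 0})] with an explicit
-- zero entry, while B returns [Counter()]; dropping zero counts is A's own documented intent
-- (its '+' comprehension does so on every other path), so the empty multiset is intended.
def D_generating_sequences_py (nqubit : Int) (energy : Int) : Prop :=
  nqubit = 0 ∧ energy = 0
instance (nqubit : Int) (energy : Int) : Decidable (D_generating_sequences_py nqubit energy) := by
  unfold D_generating_sequences_py; infer_instance

def Spec_generating_sequences_py (nqubit : Int) (energy : Int)
    (out : List (List (String × Int))) : Prop :=
  ¬ D_generating_sequences_py nqubit energy → out = generating_sequences_py_alt nqubit energy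
instance (nqubit : Int) (energy : Int) (out : List (List (String × Int))) :
    Decidable (Spec_generating_sequences_py nqubit energy out) := by
  unfold Spec_generating_sequences_py; infer_instance

def pvDiffWitness_generating_sequences_py : Int × Int := (0, 0)
def pvDiffWitnessOut_generating_sequences_py :
    (List (List (String × Int))) × (List (List (String × Int))) :=
  ([[("a", 0)]], [[]])

-- ===== CLAIM (what is proved, stated in full; the proofs are below) =====
def Claim_unchanged_generating_sequences_py : Prop :=
  ∀ (nqubit : Int) (energy : Int), Dom_generating_sequences_py nqubit energy →
    Pre_generating_sequences_py nqubit energy →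
    Spec_generating_sequences_py nqubit energy (generating_sequences_py nqubit energy)

def Claim_changed_generating_sequences_py : Prop :=
  Dom_generating_sequences_py (pvDiffWitness_generating_sequences_py.1) (pvDiffWitness_generating_sequences_py.2) ∧
  Pre_generating_sequences_py (pvDiffWitness_generating_sequences_py.1) (pvDiffWitness_generating_sequences_py.2) ∧
  D_generating_sequences_py (pvDiffWitness_generating_sequences_py.1) (pvDiffWitness_generating_sequences_py.2) ∧
  generating_sequences_py (pvDiffWitness_generating_sequences_py.1) (pvDiffWitness_generating_sequences_py.2) = pvDiffWitnessOut_generating_sequences_py.1 ∧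
  generating_sequences_py_alt (pvDiffWitness_generating_sequences_py.1) (pvDiffWitness_generating_sequences_py.2) = pvDiffWitnessOut_generating_sequences_py.2 ∧
  pvDiffWitnessOut_generating_sequences_py.1 ≠ pvDiffWitnessOut_generating_sequences_py.2

def Claim_exact_generating_sequences_py : Prop :=
  ∀ (nqubit : Int) (energy : Int), Dom_generating_sequences_py nqubit energy →
    Pre_generating_sequences_py nqubit energy →
    D_generating_sequences_py nqubit energy →
    generating_sequences_py nqubit energy ≠ generating_sequences_py_alt nqubit energy

-- ===== LEMMAS AND PROOFS =====

-- canonical stripped representation of the generator with b = c = m at energy level k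
def bcpart (m : Nat) : List (String × Int) :=
  if 0 < m then [("b", (m : Int)), ("c", (m : Int))] else []

def T (n : Int) (k m : Nat) : List (String × Int) :=
  (if 0 < n - (k : Int) - (m : Int) then [("a", n - (k : Int) - (m : Int))] else []) ++
  (if 0 < (k : Int) - (m : Int) then [("d", (k : Int) - (m : Int))] else []) ++ bcpart m

-- the raw (unstripped) child produced from parent T n k m by the a→d move
def R1 (n : Int) (k m : Nat) : List (String × Int) :=
  if 0 < (k : Int) - (m : Int) then
    ("a", n - (k : Int) - (m : Int) - 1) :: ("d", (k : Int) - (m : Int) + 1) :: bcpart m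
  else
    ("a", n - (k : Int) - (m : Int) - 1) :: (bcpart m ++ [("d", 1)])

-- the raw child produced from parent T n k m by the aa→bc move
def R2 (n : Int) (k m : Nat) : List (String × Int) :=
  ("a", n - (k : Int) - (m : Int) - 2) ::
    ((if 0 < (k : Int) - (m : Int) then [("d", (k : Int) - (m : Int))] else []) ++
     [("b", (m : Int) + 1), ("c", (m : Int) + 1)])

def childf (s : List (String × Int)) : List (List (String × Int)) :=
  (if cval s "a" > 0 then [cset (cset s "a" (cval s "a" - 1)) "d" (cval s "d" + 1)] else []) ++
  (if cval s "a" > 1 then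
    [cset (cset (cset s "a" (cval s "a" - 2)) "b" (cval s "b" + 1)) "c" (cval s "c" + 1)]
   else [])

def block (n : Int) (k m : Nat) : List (List (String × Int)) :=
  (if 0 < n - (k : Int) - (m : Int) then [R1 n k m] else []) ++
  (if 1 < n - (k : Int) - (m : Int) then [R2 n k m] else [])

def stream (n : Int) (k q j : Nat) : List (List (String × Int)) :=
  (List.range' j q).flatMap (block n k)

lemma pyA_step_eq (acc : List (List (String × Int))) (s : List (String × Int)) :
    pyA_step acc s = acc ++ childf s := by
  unfold pyA_step childf
  split_ifs <;> simp

lemma foldl_step (l : List (List (String × Int))) (acc : List (List (String × Int))) :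
    l.foldl pyA_step acc = acc ++ l.flatMap childf := by
  induction l generalizing acc with
  | nil => simp
  | cons x t ih => simp [pyA_step_eq, ih]

lemma childf_T (n : Int) (k m : Nat) : childf (T n k m) = block n k m := by
  unfold childf block T R1 R2 bcpart
  split_ifs <;> simp_all [cval, cset] <;> omega

lemma ceq_R2_R1 (n : Int) (k j : Nat) (h : (j : Int) + 1 ≤ (k : Int)) :
    ceq (R2 n k j) (R1 n k (j + 1)) = true := by
  unfold ceq R1 R2 bcpart
  split_ifs <;> (simp_all [cval] <;> omega)

lemma ceq_R2_R2 (n : Int) (k j : Nat) :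
    ceq (R2 n k j) (R2 n k (j + 1)) = false := by
  unfold ceq R2
  split_ifs <;> simp_all [cval]

lemma ceq_R1_R2 (n : Int) (k j : Nat) :
    ceq (R1 n k 0) (R2 n k j) = false := by
  unfold ceq R1 R2 bcpart
  split_ifs <;> (simp_all [cval] <;> omega)

lemma stream_nil (n : Int) (k : Nat) :
    ∀ q j : Nat, n - (k : Int) - (j : Int) ≤ 0 → stream n k q j = [] := by
  intro q
  induction q with
  | zero => intro j _; simp [stream]
  | succ q ih =>
    intro j h
    have hb : block n k j = [] := by
      unfold block
      rw [if_neg (by omega), if_neg (by omega)]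
      simp
    have hr : stream n k (q + 1) j = block n k j ++ stream n k q (j + 1) := by
      simp [stream, List.range'_succ]
    rw [hr, hb, ih (j + 1) (by push_cast; omega)]
    simp

lemma dd2 (n : Int) (k : Nat) :
    ∀ q j : Nat, 0 < n - (k : Int) - ((j : Int) + 1) →
      (j : Int) + 1 + (q : Int) ≤ min (k : Int) (n - (k : Int)) + 1 →
      cdedup (R2 n k j :: stream n k q (j + 1)) =
        R2 n k j :: List.map (R2 n k) (List.range' (j + 1) (min q (n - (k : Int) - 2 - (j : Int)).toNat)) := by
  intro q j
  induction q generalizing j with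
  | zero =>
    intro h1 h2
    simp [stream, cdedup]
  | succ q ih =>
    intro h1 h2
    have hjk : (j : Int) + 1 ≤ (k : Int) := by omega
    have hr : stream n k (q + 1) (j + 1) = block n k (j + 1) ++ stream n k q (j + 2) := by
      simp [stream, List.range'_succ]
    have hb1 : block n k (j + 1) =
        [R1 n k (j + 1)] ++ (if 1 < n - (k : Int) - ((j : Int) + 1) then [R2 n k (j + 1)] else []) := by
      unfold block
      rw [if_pos (by push_cast; omega)]
      push_cast
      rfl
    by_cases h3 : 1 < n - (k : Int) - ((j : Int) + 1)
    · rw [hr, hb1, if_pos h3]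
      rw [cdedup]
      simp only [List.cons_append, List.nil_append, List.dropWhile_cons,
        ceq_R2_R1 n k j hjk, ceq_R2_R2 n k j]
      simp only [Bool.false_eq_true, ite_true, ite_false]
      rw [ih (j + 1) (by push_cast; omega) (by push_cast at h2 ⊢; omega)]
      have hc : min (q + 1) (n - (k : Int) - 2 - (j : Int)).toNat =
          min q (n - (k : Int) - 2 - ((j : Int) + 1)).toNat + 1 := by omega
      rw [hc, List.range'_succ]
      push_cast
      try simp
    · have h4 : stream n k q (j + 2) = [] := stream_nil n k q (j + 2) (by push_cast; omega)
      rw [hr, hb1, if_neg h3, h4]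
      rw [cdedup]
      simp only [List.append_nil, List.dropWhile_cons, ceq_R2_R1 n k j hjk]
      have hc : min (q + 1) (n - (k : Int) - 2 - (j : Int)).toNat = 0 := by omega
      rw [hc]
      simp [cdedup, List.dropWhile]

lemma cplus_R1 (n : Int) (k : Nat) : cplus (R1 n k 0) = T n (k + 1) 0 := by
  unfold cplus R1 T bcpart
  split_ifs <;> simp_all [List.filter_cons, List.filter_nil] <;>
    first
    | omega
    | (split_ifs <;> simp_all <;> omega)

lemma cplus_R2 (n : Int) (k m : Nat) : cplus (R2 n k m) = T n (k + 1) (m + 1) := by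
  unfold cplus R2 T bcpart
  split_ifs <;> simp_all [List.filter_cons, List.filter_nil] <;>
    first
    | omega
    | (split_ifs <;> simp_all <;> omega)

lemma map_shift {α : Type} (f : Nat → α) :
    ∀ (len s : Nat), List.map (fun m => f (m + 1)) (List.range' s len) =
      List.map f (List.range' (s + 1) len) := by
  intro len
  induction len with
  | zero => intro s; simp
  | succ len ih => intro s; simp [List.range'_succ, ih]

lemma goA_eq (n : Int) (hn : 1 ≤ n) :
    ∀ k : Nat, (k : Int) ≤ n →
      goA n k = List.map (T n k) (List.range ((min (k : Int) (n - (k : Int))).toNat + 1)) := by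
  intro k
  induction k with
  | zero =>
    intro _
    have h0 : (min (((0 : Nat) : Int)) (n - ((0 : Nat) : Int))).toNat = 0 := by push_cast; omega
    rw [h0]
    have hT : T n 0 0 = [("a", n)] := by
      simp only [T, bcpart]
      rw [if_pos (show (0 : Int) < n - ((0 : Nat) : Int) - ((0 : Nat) : Int) by push_cast; omega),
        if_neg (show ¬ ((0 : Int) < ((0 : Nat) : Int) - ((0 : Nat) : Int)) by omega),
        if_neg (show ¬ (0 < (0 : Nat)) by omega)]
      simp
    simp [goA, List.range_succ, hT]
  | succ k ih =>
    intro hk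
    have hk1 : ((k : Int) + 1) ≤ n := by push_cast at hk; omega
    have hk' : (k : Int) ≤ n := by omega
    have hgo : goA n (k + 1) = (cdedup ((goA n k).foldl pyA_step [])).map cplus := rfl
    rw [hgo, ih hk', foldl_step]
    have hP : ((min (k : Int) (n - (k : Int))).toNat : Int) = min (k : Int) (n - (k : Int)) := by
      omega
    set P := (min (k : Int) (n - (k : Int))).toNat with hPdef
    have hfm : (List.map (T n k) (List.range (P + 1))).flatMap childf = stream n k (P + 1) 0 := by
      simp [stream, List.range_eq_range', List.flatMap_map, childf_T]
    rw [List.nil_append, hfm]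
    have hs0 : stream n k (P + 1) 0 = block n k 0 ++ stream n k P 1 := by
      simp [stream, List.range'_succ]
    have hb0 : block n k 0 =
        [R1 n k 0] ++ (if 1 < n - (k : Int) then [R2 n k 0] else []) := by
      unfold block
      rw [if_pos (by push_cast; omega)]
      simp
    rw [hs0, hb0]
    by_cases hbig : 1 < n - (k : Int)
    · rw [if_pos hbig]
      simp only [List.cons_append, List.nil_append]
      rw [cdedup]
      simp only [List.dropWhile_cons, ceq_R1_R2 n k 0, Bool.false_eq_true, ite_false]
      rw [dd2 n k P 0 (by push_cast; omega) (by push_cast; omega)]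
      have hc0 : min P (n - (k : Int) - 2 - ((0 : Nat) : Int)).toNat =
          (min ((k : Int) + 1) (n - ((k : Int) + 1))).toNat - 1 := by
        simp only [Nat.cast_zero]
        omega
      have hM : (min ((k : Int) + 1) (n - ((k : Int) + 1))).toNat =
          min P (n - (k : Int) - 2 - ((0 : Nat) : Int)).toNat + 1 := by
        simp only [Nat.cast_zero]
        omega
      simp only [List.map_cons, cplus_R1, cplus_R2, List.map_map]
      have hmm : List.map (cplus ∘ R2 n k) (List.range' 1 (min P (n - (k : Int) - 2 - ((0 : Nat) : Int)).toNat)) =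
          List.map (T n (k + 1)) (List.range' 2 (min P (n - (k : Int) - 2 - ((0 : Nat) : Int)).toNat)) := by
        rw [← map_shift (T n (k + 1))]
        exact List.map_congr_left (fun m _ => by simp [cplus_R2])
      rw [hmm]
      have hrange : List.range ((min (((k : Nat) + 1 : Nat) : Int) (n - (((k : Nat) + 1 : Nat) : Int))).toNat + 1) =
          0 :: 1 :: List.range' 2 (min P (n - (k : Int) - 2 - ((0 : Nat) : Int)).toNat) := by
        rw [List.range_eq_range']
        push_cast
        rw [hM, List.range'_succ, List.range'_succ]
        simp
      rw [hrange]
      simp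
    · rw [if_neg hbig]
      have h1 : n - (k : Int) = 1 := by omega
      rw [stream_nil n k P 1 (by push_cast; omega)]
      simp only [List.append_nil]
      rw [cdedup]
      simp only [List.dropWhile_nil]
      rw [cdedup]
      have hM0 : (min (((k : Nat) + 1 : Nat) : Int) (n - (((k : Nat) + 1 : Nat) : Int))).toNat = 0 := by
        push_cast
        omega
      rw [hM0]
      simp [cplus_R1]

lemma mk_T (n e : Int) (m : Nat) (he : 0 ≤ e) :
    mkCounter n e (m : Int) = T n e.toNat m := by
  have heq : ((e.toNat : Nat) : Int) = e := Int.toNat_of_nonneg he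
  unfold mkCounter T bcpart
  rw [heq]
  split_ifs <;> simp_all [cset]

-- ===== VERDICT (by name: the statement is the Claim_ definition above) =====
theorem generating_sequences_py_spec : Claim_unchanged_generating_sequences_py := by
  unfold Claim_unchanged_generating_sequences_py
  intro n e _ hpre
  unfold Spec_generating_sequences_py
  intro hnd
  obtain ⟨he0, hen⟩ := hpre
  have hn1 : 1 ≤ n := by
    rcases lt_or_ge n 1 with h | h
    · exact absurd ⟨by omega, by omega⟩ hnd
    · exact h
  unfold generating_sequences_py generating_sequences_py_alt
  rw [if_pos hen, if_pos he0, if_pos hen]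
  rw [goA_eq n hn1 e.toNat (by omega)]
  have hrange : (min e (n - e) + 1).toNat =
      (min ((e.toNat : Nat) : Int) (n - ((e.toNat : Nat) : Int))).toNat + 1 := by omega
  rw [hrange]
  exact List.map_congr_left (fun m _ => (mk_T n e m he0).symm)

theorem generating_sequences_py_changed : Claim_changed_generating_sequences_py := by
  unfold Claim_changed_generating_sequences_py; decide

theorem generating_sequences_py_tight : Claim_exact_generating_sequences_py := by
  intro n e _ _ hd
  obtain ⟨rfl, rfl⟩ := hd
  decide
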